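-- pv_equiv track=rewrite | github.com/jt-lanl/acd | lcra.py | get_drdc
-- ===== SOURCE A (Python) =====
-- def get_drdc(radius,circular=False):
--     '''
--     return list of tuples (dr,dc) that define a neighborhood
--     with a given radius; either square or circular
--     '''
--     ## winrange is [0, -1, 1, -2, 2, ... , -radius, radius]
--     ## equivalent to range(-radius,radius+1) but ensures '0' goes first
--     winrange = [0] + [m*n for n in range(1,1+radius) for m in (-1,1)]
--     drdclist = []
--     for dr in winrange:
--         for dc in winrange:
--             if circular and dr**2 + dc**2 > radius**2:
--                 continue
--             drdclist.append((dr,dc))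
--     ## consider sorting the list by radius dr**2 + dc**2 ... but why bother?
--     drdclist = sorted( drdclist, key= lambda rc: rc[0]**2 + rc[1]**2 )
--     return drdclist
-- ===== SOURCE B (Python) =====
-- def get_drdc(radius, circular=False):
--     '''
--     return list of tuples (dr,dc) that define a neighborhood
--     with a given radius; either square or circular
--
--     comprehension + bucket variant: build the cartesian product of the
--     window by comprehensions, filter it once for the circular case, then
--     group the points by squared distance in a dict and concatenate the
--     buckets in ascending key order instead of comparison-sorting.
--     '''
--     win = [0] + [s for n in range(1, radius + 1) for s in (-n, n)]
--     pts = [(dr, dc) for dr in win for dc in win]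
--     if circular:
--         pts = [(dr, dc) for (dr, dc) in pts if dr * dr + dc * dc <= radius * radius]
--     buckets = {}
--     for p in pts:
--         buckets.setdefault(p[0] ** 2 + p[1] ** 2, []).append(p)
--     return [p for k in sorted(buckets) for p in buckets[k]]
-- ===== Notes on version B (the rewrite author's own statement) =====
-- stated objective: alternative
-- what changed: B builds the point grid by comprehensions (product then one circular filter) and replaces A's stable comparison sort of the whole point list by a dict of buckets keyed by squared distance, concatenated in ascending key order.
import Mathlib
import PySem

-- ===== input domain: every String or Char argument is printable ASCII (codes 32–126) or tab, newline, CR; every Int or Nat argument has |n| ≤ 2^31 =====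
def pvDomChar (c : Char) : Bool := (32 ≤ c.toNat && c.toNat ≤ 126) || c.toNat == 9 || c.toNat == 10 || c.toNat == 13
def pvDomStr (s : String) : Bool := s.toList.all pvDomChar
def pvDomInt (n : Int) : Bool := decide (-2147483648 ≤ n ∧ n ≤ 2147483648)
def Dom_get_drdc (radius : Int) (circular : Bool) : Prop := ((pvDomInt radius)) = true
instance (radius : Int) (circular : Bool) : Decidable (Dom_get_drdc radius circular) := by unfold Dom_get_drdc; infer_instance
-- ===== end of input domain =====

-- B builds the point grid by comprehensions (product, then one circular filter) and replaces
-- A's stable comparison sort by distance-squared dict buckets concatenated in ascending key order.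

-- ===== PORT A =====
def get_drdc (radius : Int) (circular : Bool) : List (Int × Int) :=
  let winrange : List Int :=
    [0] ++ (PySem.List.pyRange 1 (1 + radius)).flatMap (fun n => [(-1 : Int), 1].map (fun m => m * n))
  let drdclist : List (Int × Int) :=
    winrange.foldl (fun drdclist dr =>
      winrange.foldl (fun drdclist dc =>
        if circular = true ∧ dr ^ 2 + dc ^ 2 > radius ^ 2 then drdclist
        else drdclist ++ [(dr, dc)]) drdclist) []
  PySem.List.sorted drdclist (fun rc => rc.1 ^ 2 + rc.2 ^ 2) false

-- ===== PORT B =====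
def get_drdc_alt (radius : Int) (circular : Bool) : List (Int × Int) :=
  let win : List Int := [0] ++ (PySem.List.pyRange 1 (radius + 1)).flatMap (fun n => [-n, n])
  let pts0 : List (Int × Int) := win.flatMap (fun dr => win.map (fun dc => (dr, dc)))
  let pts : List (Int × Int) :=
    if circular then pts0.filter (fun p => decide (p.1 * p.1 + p.2 * p.2 ≤ radius * radius)) else pts0
  let buckets : PySem.Dict Int (List (Int × Int)) :=
    pts.foldl (fun b p => b.modify (p.1 ^ 2 + p.2 ^ 2) [] (fun l => l ++ [p])) PySem.Dict.empty
  (PySem.List.sorted buckets.keys (fun k => k) false).flatMap (fun k => buckets.getD k [])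

-- ===== PRECONDITION & SPEC =====
def Spec_get_drdc (radius : Int) (circular : Bool) (out : List (Int × Int)) : Prop := out = get_drdc_alt radius circular
instance (radius : Int) (circular : Bool) (out : List (Int × Int)) : Decidable (Spec_get_drdc radius circular out) := by unfold Spec_get_drdc; infer_instance

-- ===== CLAIM (what is proved, stated in full; the proofs are below) =====
def Claim_equal_get_drdc : Prop := ∀ (radius : Int) (circular : Bool), Dom_get_drdc radius circular → Spec_get_drdc radius circular (get_drdc radius circular)

-- ===== LEMMAS AND PROOFS =====

-- insertBy passes over a prefix none of whose elements should come after x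
lemma pvInsertBy_append (before : (Int × Int) → (Int × Int) → Bool) (x : Int × Int)
    (b rest : List (Int × Int)) (h : ∀ y ∈ b, before x y = false) :
    PySem.List.insertBy before x (b ++ rest) = b ++ PySem.List.insertBy before x rest := by
  induction b with
  | nil => simp
  | cons y ys ih =>
      have hy : before x y = false := h y (by simp)
      simp [PySem.List.insertBy, hy, ih (fun z hz => h z (by simp [hz]))]

-- stable insertion of x into a bucket decomposition appends x to its own bucket
lemma pvInsert_bucket (key : Int × Int → Int) (x : Int × Int) :
    ∀ (ks : List Int), ks.Pairwise (· < ·) → key x ∈ ks → ∀ (L : List (Int × Int)),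
    PySem.List.insertBy (fun a b => decide (key a < key b)) x
      (ks.flatMap (fun k => L.filter (fun p => key p == k))) =
    ks.flatMap (fun k => (L ++ [x]).filter (fun p => key p == k)) := by
  intro ks
  induction ks with
  | nil => intro _ hx; simp at hx
  | cons k ks ih =>
      intro hpw hx L
      rw [List.pairwise_cons] at hpw
      obtain ⟨hklt, hpw'⟩ := hpw
      by_cases hkx : key x = k
      · -- x belongs to the first bucket
        have hbf : ∀ y ∈ L.filter (fun p => key p == k), (fun a b => decide (key a < key b)) x y = false := by
          intro y hy
          have : key y = k := by simpa using (List.of_mem_filter hy)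
          simp [this, hkx]
        have hrest : ∀ y ∈ ks.flatMap (fun k' => L.filter (fun p => key p == k')),
            key x < key y := by
          intro y hy
          obtain ⟨k', hk', hyf⟩ := List.mem_flatMap.mp hy
          have : key y = k' := by simpa using (List.of_mem_filter hyf)
          have := hklt k' hk'
          omega
        have hins : PySem.List.insertBy (fun a b => decide (key a < key b)) x
            (ks.flatMap (fun k' => L.filter (fun p => key p == k'))) =
            x :: ks.flatMap (fun k' => L.filter (fun p => key p == k')) := by
          cases hrk : ks.flatMap (fun k' => L.filter (fun p => key p == k')) with
          | nil => simp [PySem.List.insertBy]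
          | cons z zs =>
              have : key x < key z := hrest z (by rw [hrk]; simp)
              simp [PySem.List.insertBy, this]
        have hnot : ∀ k' ∈ ks, ((L ++ [x]).filter (fun p => key p == k')) =
            L.filter (fun p => key p == k') := by
          intro k' hk'
          have hne : key x ≠ k' := by have := hklt k' hk'; omega
          simp [List.filter_append, hne]
        rw [List.flatMap_cons, List.flatMap_cons,
          pvInsertBy_append _ _ _ _ hbf, hins,
          List.flatMap_congr hnot]
        simp [List.filter_append, hkx]
      · -- x belongs to a later bucket
        have hx' : key x ∈ ks := by
          rcases List.mem_cons.mp hx with h | h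
          · exact absurd h hkx
          · exact h
        have hklt' : k < key x := hklt _ hx'
        have hbf : ∀ y ∈ L.filter (fun p => key p == k), (fun a b => decide (key a < key b)) x y = false := by
          intro y hy
          have : key y = k := by simpa using (List.of_mem_filter hy)
          simp [this]; omega
        rw [List.flatMap_cons, List.flatMap_cons,
          pvInsertBy_append _ _ _ _ hbf, ih hpw' hx' L]
        have : ((L ++ [x]).filter (fun p => key p == k)) = L.filter (fun p => key p == k) := by
          have hne : key x ≠ k := by omega
          simp [List.filter_append, hne]
        rw [this]

-- a stable sort is the concatenation of the buckets in ascending key order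
lemma pvBucket_sorted (key : Int × Int → Int) (ks : List Int) (hks : ks.Pairwise (· < ·)) :
    ∀ (L : List (Int × Int)), (∀ p ∈ L, key p ∈ ks) →
    PySem.List.sorted L key false = ks.flatMap (fun k => L.filter (fun p => key p == k)) := by
  intro L
  induction L using List.reverseRecOn with
  | nil => intro _; rw [PySem.List.sorted_eq_foldl_insertBy]; simp
  | append_singleton L x ih =>
      intro hmem
      have hL : ∀ p ∈ L, key p ∈ ks := fun p hp => hmem p (by simp [hp])
      have hx : key x ∈ ks := hmem x (by simp)
      rw [PySem.List.sorted_eq_foldl_insertBy, List.foldl_append, List.foldl_cons, List.foldl_nil,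
        ← PySem.List.sorted_eq_foldl_insertBy, ih hL, pvInsert_bucket key x ks hks hx L]

-- filter distributes over flatMap
lemma pvFilter_flatMap {α β : Type} (l : List α) (f : α → List β) (p : β → Bool) :
    (l.flatMap f).filter p = l.flatMap (fun a => (f a).filter p) := by
  induction l with
  | nil => rfl
  | cons a l ih => simp [List.flatMap_cons, List.filter_append, ih]

theorem get_drdc_spec_aux (radius : Int) (circular : Bool) :
    get_drdc radius circular = get_drdc_alt radius circular := by
  simp only [get_drdc, get_drdc_alt]
  set key : Int × Int → Int := fun rc => rc.1 ^ 2 + rc.2 ^ 2 with hkey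
  set ok : Int → Int → Prop := fun dr dc => ¬(circular = true ∧ dr ^ 2 + dc ^ 2 > radius ^ 2) with hok
  -- the two window lists coincide
  have hwin : ([0] ++ (PySem.List.pyRange 1 (1 + radius)).flatMap (fun n => [(-1 : Int), 1].map (fun m => m * n)))
      = ([0] ++ (PySem.List.pyRange 1 (radius + 1)).flatMap (fun n => [-n, n])) := by
    rw [Int.add_comm 1 radius]
    congr 1
    refine List.flatMap_congr ?_
    intro n _
    simp
  rw [hwin]
  set W : List Int := [0] ++ (PySem.List.pyRange 1 (radius + 1)).flatMap (fun n => [-n, n]) with hW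
  set pts0 : List (Int × Int) := W.flatMap (fun dr => W.map (fun dc => (dr, dc))) with hpts0
  set pts : List (Int × Int) :=
    if circular then pts0.filter (fun p => decide (p.1 * p.1 + p.2 * p.2 ≤ radius * radius)) else pts0
    with hpts
  -- A's pre-sort list equals B's pts
  have hA : W.foldl (fun acc dr =>
      W.foldl (fun acc dc =>
        if circular = true ∧ dr ^ 2 + dc ^ 2 > radius ^ 2 then acc
        else acc ++ [(dr, dc)]) acc) [] = pts := by
    have hinner : ∀ (acc : List (Int × Int)) (dr : Int), dr ∈ W →
        W.foldl (fun acc dc =>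
          if circular = true ∧ dr ^ 2 + dc ^ 2 > radius ^ 2 then acc
          else acc ++ [(dr, dc)]) acc =
        acc ++ (W.filter (fun dc => decide (ok dr dc))).map (fun dc => (dr, dc)) := by
      intro acc dr _
      rw [PySem.List.foldl_congr_mem W _
        (fun acc dc => if ok dr dc then acc ++ [(dr, dc)] else acc) acc
        (by intro a dc _
            by_cases h : circular = true ∧ dr ^ 2 + dc ^ 2 > radius ^ 2 <;> simp [hok, h])]
      exact PySem.List.foldl_append_ite (ok dr) (fun dc => (dr, dc)) W acc
    rw [PySem.List.foldl_congr_mem W _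
      (fun acc dr => acc ++ (W.filter (fun dc => decide (ok dr dc))).map (fun dc => (dr, dc))) []
      (fun acc dr h => hinner acc dr h)]
    rw [PySem.List.foldl_append_eq_flatMap]
    simp only [List.nil_append]
    -- now compare the flatMap-of-filters with B's filtered product
    by_cases hc : circular = true
    · rw [hpts, if_pos hc]
      rw [hpts0, pvFilter_flatMap]
      refine List.flatMap_congr ?_
      intro dr _
      rw [List.filter_map]
      congr 1
      refine List.filter_congr ?_
      intro dc _
      simp only [Function.comp]
      have h2 : ∀ x : Int, x ^ 2 = x * x := fun x => sq x
      by_cases h : dr * dr + dc * dc ≤ radius * radius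
      · simp [hok, hc, h2, h]
      · simp [hok, hc, h2, h]
    · have hcf : circular = false := by simpa using hc
      rw [hpts, if_neg hc]
      rw [hpts0]
      refine List.flatMap_congr ?_
      intro dr _
      have : W.filter (fun dc => decide (ok dr dc)) = W := by
        refine List.filter_eq_self.mpr ?_
        intro dc _
        simp [hok, hcf]
      rw [this]
  rw [hA]
  -- B's dict is a fold of modify over the (key, point) pairs of pts
  have hB : pts.foldl (fun b p => b.modify (p.1 ^ 2 + p.2 ^ 2) [] (fun l => l ++ [p])) PySem.Dict.empty =
      (pts.map (fun p => (key p, p))).foldl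
        (fun d q => d.modify q.1 [] (fun l => l ++ [q.2])) PySem.Dict.empty := by
    rw [List.foldl_map]
  rw [hB]
  set buckets := (pts.map (fun p => (key p, p))).foldl
    (fun d q => d.modify q.1 [] (fun l => l ++ [q.2])) PySem.Dict.empty with hbk
  -- buckets.getD k [] = the k-bucket of pts
  have hgetD : ∀ k : Int, buckets.getD k [] = pts.filter (fun p => key p == k) := by
    intro k
    rw [hbk, PySem.Dict.getD_foldl_modify_append, PySem.Dict.getD_empty]
    rw [List.filter_map, List.map_map]
    simp [Function.comp_def]
  -- buckets.keys = the distinct keys of pts, in first-occurrence order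
  have hkeys : buckets.keys = PySem.Set.ofList (pts.map key) := by
    rw [hbk]
    have := PySem.Dict.keys_foldl_modify_key (pts.map (fun p => (key p, p)))
      (fun q => q.1) ([] : List (Int × Int)) (fun _ q l => l ++ [q.2]) PySem.Dict.empty
    simp only [List.foldl_map] at this ⊢
    rw [this]
    rw [List.map_map]
    simp [PySem.Set.update, PySem.Set.ofList, PySem.Dict.keys_empty, Function.comp_def]
  rw [hkeys]
  set ks := PySem.List.sorted (PySem.Set.ofList (pts.map key)) (fun k => k) false with hks
  have hpw : ks.Pairwise (· < ·) := PySem.List.sorted_ofList_pairwise_lt (pts.map key)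
  have hmem : ∀ p ∈ pts, key p ∈ ks := by
    intro p hp
    rw [hks, PySem.List.mem_sorted, PySem.Set.mem_ofList]
    exact List.mem_map_of_mem hp
  rw [List.flatMap_congr (fun k _ => hgetD k)]
  exact pvBucket_sorted key ks hpw pts hmem

-- ===== VERDICT (by name: the statement is the Claim_ definition above) =====
theorem get_drdc_spec : Claim_equal_get_drdc := by
  intro radius circular _
  exact get_drdc_spec_aux radius circular
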